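-- pv_equiv track=rewrite | github.com/broken-byte/general_interview_prep | problems/algorithm_problems/deletion_distance/most_optimal.py | deletion_distance
-- ===== SOURCE A (Python) =====
-- def deletion_distance(str1: str, str2: str) -> int:
--     """
--     n = len(str1)
--     m = len(str2)
--     Time Complexity: O(n*m)
--     Space Complexity: O(min(n, m))
--     """
--     if len(str1) < len(str2):
--         temp = str1
--         str1 = str2
--         str2 = temp
--     length_1: int = len(str1)
--     length_2: int = len(str2)
--     previous = [index for index in range(length_2 + 1)]
--     current = [0 for _ in range(length_2 + 1)]
--     for i in range(1, length_1 + 1):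
--         current[0] = i
--         for j in range(1, length_2 + 1):
--             if str1[i - 1] == str2[j - 1]:
--                 diagonal: int = previous[j - 1]
--                 current[j] = diagonal
--             else:
--                 left_value: int = current[j - 1]
--                 up_value: int = previous[j]
--                 minimum_previous_value: int = min(left_value, up_value)
--                 current[j] = 1 + minimum_previous_value
--         previous = current.copy()
--     return current[-1]
-- ===== SOURCE B (Python) =====
-- def deletion_distance(str1: str, str2: str) -> int:
--     # LCS with a rolling row, then the deletion-distance identity
--     # dist = len1 + len2 - 2 * LCS(str1, str2).
--     if len(str1) < len(str2):
--         str1, str2 = str2, str1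
--     prev = [0] * (len(str2) + 1)
--     for ch in str1:
--         cur = [0]
--         for ch2, diag, up in zip(str2, prev, prev[1:]):
--             cur.append(diag + 1 if ch == ch2 else max(cur[-1], up))
--         prev = cur
--     return len(str1) + len(str2) - 2 * prev[-1]
-- ===== Notes on version B (the rewrite author's own statement) =====
-- stated objective: alternative
-- what changed: B replaces A's min-based deletion-distance DP (cell = 1 + min(left, up) on mismatch) by a rolling-row longest-common-subsequence DP (diagonal+1 on match, max(left, up) on mismatch) and closes with the identity dist = len1 + len2 - 2*LCS.
import Mathlib
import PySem

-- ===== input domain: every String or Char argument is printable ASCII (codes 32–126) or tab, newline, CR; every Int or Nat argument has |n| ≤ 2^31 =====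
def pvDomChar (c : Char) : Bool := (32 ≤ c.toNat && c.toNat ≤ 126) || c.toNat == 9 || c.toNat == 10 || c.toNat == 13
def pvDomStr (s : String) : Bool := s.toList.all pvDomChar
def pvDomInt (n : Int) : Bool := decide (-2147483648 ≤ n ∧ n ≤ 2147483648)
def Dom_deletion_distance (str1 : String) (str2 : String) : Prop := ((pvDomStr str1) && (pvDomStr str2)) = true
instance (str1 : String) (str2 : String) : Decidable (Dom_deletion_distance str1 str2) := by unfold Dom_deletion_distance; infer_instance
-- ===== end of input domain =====

-- B replaces A's min-based deletion-distance DP by a rolling-row LCS DP (max recurrence)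
-- plus the identity dist = len1 + len2 - 2*LCS; same O(n*m) cost, different decomposition.

-- ===== PORT A =====
-- literal transliteration of A: swap so str1 is the longer string, previous = range row,
-- current overwritten in place (List.set; every index is provably in range, so the
-- '.getD 0' after pyGet? never fires), previous = current.copy() at the end of each row.
def deletion_distance (str1 : String) (str2 : String) : Int :=
  let p := if PySem.Str.len str1 < PySem.Str.len str2 then (str2, str1) else (str1, str2)
  let s1 := p.1
  let s2 := p.2
  let length_1 : Int := PySem.Str.len s1
  let length_2 : Int := PySem.Str.len s2
  let previous : List Int := PySem.List.pyRange 0 (length_2 + 1)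
  let current : List Int := (PySem.List.pyRange 0 (length_2 + 1)).map (fun _ => (0 : Int))
  let st := (PySem.List.pyRange 1 (length_1 + 1)).foldl
    (fun (st : List Int × List Int) i =>
      let current := st.2.set 0 i
      let current := (PySem.List.pyRange 1 (length_2 + 1)).foldl
        (fun cur j =>
          if PySem.Str.pyGet? s1 (i - 1) = PySem.Str.pyGet? s2 (j - 1) then
            let diagonal : Int := (PySem.List.pyGet? st.1 (j - 1)).getD 0
            cur.set j.toNat diagonal
          else
            let left_value : Int := (PySem.List.pyGet? cur (j - 1)).getD 0
            let up_value : Int := (PySem.List.pyGet? st.1 j).getD 0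
            let minimum_previous_value : Int := min left_value up_value
            cur.set j.toNat (1 + minimum_previous_value)) current
      (current, current)) (previous, current)
  (PySem.List.pyGet? st.2 (-1)).getD 0

-- ===== PORT B =====
-- inner loop of Source B: 'for ch2, diag, up in zip(str2, prev, prev[1:])', appending
-- 'diag + 1 if ch == ch2 else max(cur[-1], up)'; 'left' carries cur[-1].
def ddAltRow (x : Char) : List (Char × Int × Int) → Int → List Int
  | [], _ => []
  | (c, du) :: rest, left =>
    let v := if x = c then du.1 + 1 else max left du.2
    v :: ddAltRow x rest v

-- outer loop of Source B: 'for ch in str1: ... prev = cur' (cur starts as [0])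
def ddAltLoop (ys : List Char) : List Char → List Int → List Int
  | [], prev => prev
  | x :: xs, prev => ddAltLoop ys xs (0 :: ddAltRow x (ys.zip (prev.zip (prev.drop 1))) 0)

def deletion_distance_alt (str1 : String) (str2 : String) : Int :=
  let p := if PySem.Str.len str1 < PySem.Str.len str2 then (str2, str1) else (str1, str2)
  let xs := p.1.toList
  let ys := p.2.toList
  let prev : List Int := List.replicate (ys.length + 1) 0
  let final := ddAltLoop ys xs prev
  (xs.length : Int) + (ys.length : Int) - 2 * (PySem.List.pyGet? final (-1)).getD 0

-- ===== PRECONDITION & SPEC =====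
def Spec_deletion_distance (str1 : String) (str2 : String) (out : Int) : Prop := out = deletion_distance_alt str1 str2
instance (str1 : String) (str2 : String) (out : Int) : Decidable (Spec_deletion_distance str1 str2 out) := by unfold Spec_deletion_distance; infer_instance

-- ===== CLAIM (what is proved, stated in full; the proofs are below) =====
def Claim_equal_deletion_distance : Prop := ∀ (str1 : String) (str2 : String), Dom_deletion_distance str1 str2 → Spec_deletion_distance str1 str2 (deletion_distance str1 str2)

-- ===== LEMMAS AND PROOFS =====

-- deletion distance of the length-i prefix of xs and the length-j prefix of ys (A's DP cell)
def Dij (xs ys : List Char) : Nat → Nat → Int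
  | 0, j => (j : Int)
  | i + 1, 0 => (i : Int) + 1
  | i + 1, j + 1 =>
    if xs.getD i 'a' = ys.getD j 'a' then Dij xs ys i j
    else 1 + min (Dij xs ys (i + 1) j) (Dij xs ys i (j + 1))
  termination_by i j => i + j

-- LCS length of the same prefixes (B's DP cell)
def Lij (xs ys : List Char) : Nat → Nat → Int
  | 0, _ => 0
  | _ + 1, 0 => 0
  | i + 1, j + 1 =>
    if xs.getD i 'a' = ys.getD j 'a' then Lij xs ys i j + 1
    else max (Lij xs ys (i + 1) j) (Lij xs ys i (j + 1))
  termination_by i j => i + j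

-- the deletion-distance identity, cell by cell
theorem Dij_eq (xs ys : List Char) : ∀ i j, Dij xs ys i j = (i : Int) + j - 2 * Lij xs ys i j := by
  intro i j
  fun_induction Dij xs ys i j with
  | case1 j => simp [Lij]
  | case2 i => simp [Lij]
  | case3 i j h ih => rw [Lij, if_pos h, ih]; push_cast; ring
  | case4 i j h ih1 ih2 => rw [Lij, if_neg h, ih1, ih2]; push_cast; omega

def rowL (xs ys : List Char) (i j0 : Nat) : List Int :=
  (List.range (ys.length + 1 - j0)).map (fun t => Lij xs ys i (j0 + t))

theorem rowL_cons (xs ys : List Char) (i j0 : Nat) (h : j0 < ys.length + 1) :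
    rowL xs ys i j0 = Lij xs ys i j0 :: rowL xs ys i (j0 + 1) := by
  unfold rowL
  have hsub : ys.length + 1 - j0 = (ys.length + 1 - (j0 + 1)) + 1 := by omega
  rw [hsub, List.range_succ_eq_map, List.map_cons, List.map_map]
  congr 1
  apply List.map_congr_left; intro t _
  simp only [Function.comp_apply, Nat.succ_eq_add_one]
  congr 1; omega

theorem ddAltRow_spec (xs ys : List Char) (i : Nat) :
    ∀ (ts : List Char) (j0 : Nat), j0 + ts.length = ys.length → ys.drop j0 = ts →
      ddAltRow (xs.getD i 'a') (ts.zip ((rowL xs ys i j0).zip ((rowL xs ys i j0).drop 1)))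
        (Lij xs ys (i + 1) j0)
      = (List.range (ys.length - j0)).map (fun t => Lij xs ys (i + 1) (j0 + 1 + t)) := by
  intro ts
  induction ts with
  | nil =>
    intro j0 hlen _
    have h0 : ys.length - j0 = 0 := by simp at hlen; omega
    simp [ddAltRow, h0]
  | cons c ts' ih =>
    intro j0 hlen hdrop
    have hlen' : j0 + ts'.length + 1 = ys.length := by simpa [Nat.add_assoc] using hlen
    have h0 : j0 < ys.length + 1 := by omega
    have h1 : j0 + 1 < ys.length + 1 := by omega
    have hc : c = ys.getD j0 'a' := by
      have := congrArg (fun l => l.getD 0 'a') hdrop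
      simpa [List.getD, List.getElem?_drop] using this.symm
    have hdrop' : ys.drop (j0 + 1) = ts' := by
      have := congrArg (fun l => l.drop 1) hdrop
      simpa [List.drop_drop, Nat.add_comm] using this
    have ihx := ih (j0 + 1) (by omega) hdrop'
    rw [rowL_cons xs ys i (j0+1) h1] at ihx
    simp only [List.drop_succ_cons, List.drop_zero] at ihx
    rw [rowL_cons xs ys i j0 h0]
    simp only [List.drop_succ_cons, List.drop_zero]
    rw [rowL_cons xs ys i (j0+1) h1]
    simp only [List.zip_cons_cons, ddAltRow]
    have hv : (if xs.getD i 'a' = c then Lij xs ys i j0 + 1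
        else max (Lij xs ys (i+1) j0) (Lij xs ys i (j0+1))) = Lij xs ys (i+1) (j0+1) := by
      rw [hc, Lij]
    simp only [hv]
    rw [ihx]
    have hlen2 : ys.length - j0 = (ys.length - (j0 + 1)) + 1 := by omega
    rw [hlen2, List.range_succ_eq_map, List.map_cons, List.map_map]
    congr 1
    apply List.map_congr_left; intro t _
    simp only [Function.comp_apply, Nat.succ_eq_add_one]
    congr 1; omega

theorem Lij_zero_right (xs ys : List Char) (i : Nat) : Lij xs ys i 0 = 0 := by
  cases i <;> rw [Lij]

theorem ddAltLoop_spec (xs ys : List Char) :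
    ∀ (ts : List Char) (i : Nat), i + ts.length = xs.length → xs.drop i = ts →
      ddAltLoop ys ts (rowL xs ys i 0) = rowL xs ys xs.length 0 := by
  intro ts
  induction ts with
  | nil =>
    intro i hlen _
    have : i = xs.length := by simpa using hlen
    rw [ddAltLoop, this]
  | cons x ts' ih =>
    intro i hlen hdrop
    have hx : x = xs.getD i 'a' := by
      have := congrArg (fun l => l.getD 0 'a') hdrop
      simpa [List.getD, List.getElem?_drop] using this.symm
    have hdrop' : xs.drop (i + 1) = ts' := by
      have := congrArg (fun l => l.drop 1) hdrop
      simpa [List.drop_drop, Nat.add_comm] using this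
    have hlen' : i + ts'.length + 1 = xs.length := by simpa [Nat.add_assoc] using hlen
    rw [ddAltLoop]
    have hrow := ddAltRow_spec xs ys i ys 0 (by simp) (by simp)
    rw [Lij_zero_right] at hrow
    rw [hx, hrow]
    have hcons : (0 : Int) :: (List.range (ys.length - 0)).map (fun t => Lij xs ys (i+1) (0+1+t))
        = rowL xs ys (i + 1) 0 := by
      rw [rowL_cons xs ys (i+1) 0 (by omega), Lij_zero_right]
      congr 1
    rw [hcons]
    exact ih (i + 1) (by omega) hdrop'

theorem rowL_zero (xs ys : List Char) : rowL xs ys 0 0 = List.replicate (ys.length + 1) 0 := by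
  unfold rowL
  have : ∀ t ∈ List.range (ys.length + 1 - 0), Lij xs ys 0 (0 + t) = 0 := by
    intro t _; rw [Lij]
  rw [List.map_congr_left this]
  simp [List.map_const']

theorem rowL_getLast (xs ys : List Char) (i : Nat) :
    (rowL xs ys i 0).getLast? = some (Lij xs ys i ys.length) := by
  unfold rowL
  simp only [Nat.sub_zero]
  rw [List.range_succ]
  simp

-- B's port computes len1 + len2 - 2 * LCS
theorem alt_eq (str1 str2 : String) :
    deletion_distance_alt str1 str2 =
      (let p := if PySem.Str.len str1 < PySem.Str.len str2 then (str2, str1) else (str1, str2)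
       ((p.1.toList.length : Int) + p.2.toList.length
         - 2 * Lij p.1.toList p.2.toList p.1.toList.length p.2.toList.length)) := by
  unfold deletion_distance_alt
  simp only []
  set p := if PySem.Str.len str1 < PySem.Str.len str2 then (str2, str1) else (str1, str2) with hp
  have h0 : List.replicate (p.2.toList.length + 1) (0 : Int) = rowL p.1.toList p.2.toList 0 0 :=
    (rowL_zero _ _).symm
  rw [h0, ddAltLoop_spec p.1.toList p.2.toList p.1.toList (0) (by omega) (by simp)]
  rw [PySem.List.pyGet?_neg_one, rowL_getLast]
  simp

-- ===== the A side =====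

def rowD (xs ys : List Char) (i : Nat) : List Int :=
  (List.range (ys.length + 1)).map (fun t => Dij xs ys i t)

theorem length_rowD (xs ys : List Char) (i : Nat) : (rowD xs ys i).length = ys.length + 1 := by
  simp [rowD]

theorem getD_rowD (xs ys : List Char) (i t : Nat) (ht : t ≤ ys.length) :
    (rowD xs ys i).getD t 0 = Dij xs ys i t := by
  unfold rowD
  rw [List.getD_eq_getElem?_getD, List.getElem?_map]
  simp [Nat.lt_succ_of_le ht]

theorem rowD_getLast (xs ys : List Char) (i : Nat) :
    (rowD xs ys i).getLast? = some (Dij xs ys i ys.length) := by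
  unfold rowD
  rw [List.range_succ]
  simp

-- A's inner-loop body, as the port's lambda (definitionally equal to it)
def stepA (s1 s2 : String) (prev : List Int) (i : Int) (cur : List Int) (j : Int) : List Int :=
  if PySem.Str.pyGet? s1 (i - 1) = PySem.Str.pyGet? s2 (j - 1) then
    let diagonal : Int := (PySem.List.pyGet? prev (j - 1)).getD 0
    cur.set j.toNat diagonal
  else
    let left_value : Int := (PySem.List.pyGet? cur (j - 1)).getD 0
    let up_value : Int := (PySem.List.pyGet? prev j).getD 0
    let minimum_previous_value : Int := min left_value up_value
    cur.set j.toNat (1 + minimum_previous_value)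

theorem pyGet_nat (l : List Int) (t : Nat) (h : t < l.length) :
    PySem.List.pyGet? l (t : Int) = some (l.getD t 0) := by
  rw [PySem.List.pyGet?_natCast, List.getElem?_eq_getElem h, List.getD_eq_getElem l 0 h]

theorem condA (s1 s2 : String) (xs ys : List Char) (hs1 : s1.toList = xs) (hs2 : s2.toList = ys)
    (i k : Nat) (hi : i < xs.length) (hk : k < ys.length) :
    (PySem.Str.pyGet? s1 (i : Int) = PySem.Str.pyGet? s2 (k : Int)) ↔
      (xs.getD i 'a' = ys.getD k 'a') := by
  subst hs1; subst hs2
  rw [PySem.Str.pyGet?_eq, PySem.Str.pyGet?_eq, PySem.Chars.pyGet?_eq_listPyGet?,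
    PySem.Chars.pyGet?_eq_listPyGet?, PySem.List.pyGet?_natCast, PySem.List.pyGet?_natCast,
    List.getElem?_eq_getElem hi, List.getElem?_eq_getElem hk,
    List.getD_eq_getElem _ _ hi, List.getD_eq_getElem _ _ hk]
  simp

theorem innerA_spec (xs ys : List Char) (s1 s2 : String) (hs1 : s1.toList = xs)
    (hs2 : s2.toList = ys) (i : Nat) (hi : i < xs.length) :
    ∀ (k : Nat), k ≤ ys.length → ∀ (cur : List Int), cur.length = ys.length + 1 →
      ((PySem.List.pyRange 1 ((k : Int) + 1)).foldl (stepA s1 s2 (rowD xs ys i) ((i : Int) + 1))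
          (cur.set 0 ((i : Int) + 1))).length = ys.length + 1 ∧
      ∀ t, t ≤ ys.length →
        ((PySem.List.pyRange 1 ((k : Int) + 1)).foldl (stepA s1 s2 (rowD xs ys i) ((i : Int) + 1))
            (cur.set 0 ((i : Int) + 1))).getD t 0
          = if t ≤ k then Dij xs ys (i + 1) t else cur.getD t 0 := by
  intro k
  induction k with
  | zero =>
    intro _ cur hcur
    rw [show ((0 : Nat) : Int) + 1 = 1 by norm_num, PySem.List.pyRange_one_eq_nil le_rfl]
    simp only [List.foldl_nil]
    refine ⟨by simp [hcur], ?_⟩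
    intro t ht
    rcases Nat.eq_zero_or_pos t with h0 | hpos
    · subst h0
      rw [List.getD_eq_getElem?_getD, List.getElem?_set_self (by omega), if_pos le_rfl]
      rw [show Dij xs ys (i + 1) 0 = (i : Int) + 1 from by rw [Dij]]
      simp
    · rw [if_neg (by omega), List.getD_eq_getElem?_getD, List.getElem?_set_ne (by omega),
        List.getD_eq_getElem?_getD]
  | succ k ih =>
    intro hk1 cur hcur
    have hk : k ≤ ys.length := by omega
    have hkys : k < ys.length := by omega
    obtain ⟨ihlen, ihval⟩ := ih hk cur hcur
    have hcast : (((k + 1 : Nat) : Int) + 1) = ((k : Int) + 1) + 1 := by push_cast; ring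
    rw [hcast, show PySem.List.pyRange 1 (((k : Int) + 1) + 1)
        = PySem.List.pyRange 1 ((k : Int) + 1) ++ [(k : Int) + 1]
      from PySem.List.pyRange_one_succ_right (by omega), List.foldl_append,
      List.foldl_cons, List.foldl_nil]
    set res := (PySem.List.pyRange 1 ((k : Int) + 1)).foldl
      (stepA s1 s2 (rowD xs ys i) ((i : Int) + 1)) (cur.set 0 ((i : Int) + 1)) with hres
    have hsub1 : ((i : Int) + 1) - 1 = (i : Int) := by ring
    have hsubj : ((k : Int) + 1) - 1 = (k : Int) := by ring
    have htn : ((k : Int) + 1).toNat = k + 1 := by omega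
    have hgetprev : PySem.List.pyGet? (rowD xs ys i) ((k : Int)) = some (Dij xs ys i k) := by
      rw [pyGet_nat _ _ (by rw [length_rowD]; omega), getD_rowD _ _ _ _ hk]
    have hgetprev1 : PySem.List.pyGet? (rowD xs ys i) ((k : Int) + 1) = some (Dij xs ys i (k + 1)) := by
      rw [show ((k : Int) + 1) = ((k + 1 : Nat) : Int) by push_cast; ring,
        pyGet_nat _ _ (by rw [length_rowD]; omega), getD_rowD _ _ _ _ (by omega)]
    have hgetres : PySem.List.pyGet? res ((k : Int)) = some (Dij xs ys (i + 1) k) := by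
      rw [pyGet_nat _ _ (by rw [ihlen]; omega), ihval k hk, if_pos le_rfl]
    unfold stepA
    rw [hsub1, hsubj, htn, hgetprev, hgetprev1, hgetres]
    have hDsucc : Dij xs ys (i + 1) (k + 1) =
        if xs.getD i 'a' = ys.getD k 'a' then Dij xs ys i k
        else 1 + min (Dij xs ys (i + 1) k) (Dij xs ys i (k + 1)) := by rw [Dij]
    by_cases hcond : PySem.Str.pyGet? s1 ((i : Int)) = PySem.Str.pyGet? s2 ((k : Int))
    · rw [if_pos hcond]
      have hchar : xs.getD i 'a' = ys.getD k 'a' := (condA s1 s2 xs ys hs1 hs2 i k hi hkys).mp hcond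
      refine ⟨by simp [ihlen], ?_⟩
      intro t ht
      rcases Nat.lt_trichotomy t (k + 1) with hlt | heq | hgt
      · rw [List.getD_eq_getElem?_getD, List.getElem?_set_ne (by omega),
          ← List.getD_eq_getElem?_getD, ihval t ht, if_pos (by omega), if_pos (by omega)]
      · subst heq
        rw [List.getD_eq_getElem?_getD, List.getElem?_set_self (by rw [ihlen]; omega)]
        simp only [Option.getD_some]
        rw [if_pos le_rfl, hDsucc, if_pos hchar]
      · rw [List.getD_eq_getElem?_getD, List.getElem?_set_ne (by omega),
          ← List.getD_eq_getElem?_getD, ihval t ht, if_neg (by omega), if_neg (by omega)]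
    · rw [if_neg hcond]
      have hchar : ¬ xs.getD i 'a' = ys.getD k 'a' := fun hc =>
        hcond ((condA s1 s2 xs ys hs1 hs2 i k hi hkys).mpr hc)
      refine ⟨by simp [ihlen], ?_⟩
      intro t ht
      rcases Nat.lt_trichotomy t (k + 1) with hlt | heq | hgt
      · rw [List.getD_eq_getElem?_getD, List.getElem?_set_ne (by omega),
          ← List.getD_eq_getElem?_getD, ihval t ht, if_pos (by omega), if_pos (by omega)]
      · subst heq
        rw [List.getD_eq_getElem?_getD, List.getElem?_set_self (by rw [ihlen]; omega)]
        simp only [Option.getD_some]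
        rw [if_pos le_rfl, hDsucc, if_neg hchar]
      · rw [List.getD_eq_getElem?_getD, List.getElem?_set_ne (by omega),
          ← List.getD_eq_getElem?_getD, ihval t ht, if_neg (by omega), if_neg (by omega)]

theorem innerA_eq (xs ys : List Char) (s1 s2 : String) (hs1 : s1.toList = xs)
    (hs2 : s2.toList = ys) (i : Nat) (hi : i < xs.length) (cur : List Int)
    (hcur : cur.length = ys.length + 1) :
    (PySem.List.pyRange 1 ((ys.length : Int) + 1)).foldl
        (stepA s1 s2 (rowD xs ys i) ((i : Int) + 1)) (cur.set 0 ((i : Int) + 1))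
      = rowD xs ys (i + 1) := by
  obtain ⟨hlen, hval⟩ := innerA_spec xs ys s1 s2 hs1 hs2 i hi ys.length le_rfl cur hcur
  apply List.ext_getElem (by rw [hlen, length_rowD])
  intro t h1 h2
  have ht : t ≤ ys.length := by rw [hlen] at h1; omega
  have := hval t ht
  rw [if_pos ht] at this
  rw [← List.getD_eq_getElem _ 0 h1, this, ← getD_rowD xs ys (i + 1) t ht,
    List.getD_eq_getElem _ 0 h2]

theorem outerA_spec (xs ys : List Char) (s1 s2 : String) (hs1 : s1.toList = xs)
    (hs2 : s2.toList = ys) :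
    ∀ (n : Nat), n ≤ xs.length → ∀ (cur0 : List Int), cur0.length = ys.length + 1 →
      ((PySem.List.pyRange 1 ((n : Int) + 1)).foldl
        (fun (st : List Int × List Int) i =>
          ((PySem.List.pyRange 1 ((ys.length : Int) + 1)).foldl (stepA s1 s2 st.1 i)
              (st.2.set 0 i),
           (PySem.List.pyRange 1 ((ys.length : Int) + 1)).foldl (stepA s1 s2 st.1 i)
              (st.2.set 0 i))) (rowD xs ys 0, cur0)).1 = rowD xs ys n ∧
      ((PySem.List.pyRange 1 ((n : Int) + 1)).foldl
        (fun (st : List Int × List Int) i =>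
          ((PySem.List.pyRange 1 ((ys.length : Int) + 1)).foldl (stepA s1 s2 st.1 i)
              (st.2.set 0 i),
           (PySem.List.pyRange 1 ((ys.length : Int) + 1)).foldl (stepA s1 s2 st.1 i)
              (st.2.set 0 i))) (rowD xs ys 0, cur0)).2.length = ys.length + 1 ∧
      (1 ≤ n →
        ((PySem.List.pyRange 1 ((n : Int) + 1)).foldl
          (fun (st : List Int × List Int) i =>
            ((PySem.List.pyRange 1 ((ys.length : Int) + 1)).foldl (stepA s1 s2 st.1 i)
                (st.2.set 0 i),
             (PySem.List.pyRange 1 ((ys.length : Int) + 1)).foldl (stepA s1 s2 st.1 i)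
                (st.2.set 0 i))) (rowD xs ys 0, cur0)).2 = rowD xs ys n) := by
  intro n
  induction n with
  | zero =>
    intro _ cur0 hcur0
    rw [show ((0 : Nat) : Int) + 1 = 1 by norm_num, PySem.List.pyRange_one_eq_nil le_rfl]
    exact ⟨rfl, hcur0, by omega⟩
  | succ n ih =>
    intro hn cur0 hcur0
    obtain ⟨ih1, ih2, _⟩ := ih (by omega) cur0 hcur0
    have hcast : (((n + 1 : Nat) : Int) + 1) = ((n : Int) + 1) + 1 := by push_cast; ring
    rw [hcast, show PySem.List.pyRange 1 (((n : Int) + 1) + 1)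
        = PySem.List.pyRange 1 ((n : Int) + 1) ++ [(n : Int) + 1]
      from PySem.List.pyRange_one_succ_right (by omega), List.foldl_append,
      List.foldl_cons, List.foldl_nil]
    have hrow := innerA_eq xs ys s1 s2 hs1 hs2 n (by omega) _ ih2
    refine ⟨?_, ?_, fun _ => ?_⟩ <;>
      simp only [ih1, hrow, length_rowD]

theorem lenA (s : String) : PySem.Str.len s = (s.toList.length : Int) := PySem.Str.len_eq s

theorem init_prev (m : Nat) (xs ys : List Char) (hm : ys.length = m) :
    PySem.List.pyRange 0 ((m : Int) + 1) = rowD xs ys 0 := by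
  subst hm
  rw [show ((ys.length : Int) + 1) = ((ys.length + 1 : Nat) : Int) by push_cast; ring,
    PySem.List.pyRange_zero_natCast]
  unfold rowD
  apply List.map_congr_left
  intro t _
  rw [show Dij xs ys 0 t = (t : Int) from by rw [Dij]]

theorem aCore (s1 s2 : String) (h : s2.toList.length ≤ s1.toList.length) :
    (let length_1 : Int := PySem.Str.len s1
     let length_2 : Int := PySem.Str.len s2
     let previous : List Int := PySem.List.pyRange 0 (length_2 + 1)
     let current : List Int := (PySem.List.pyRange 0 (length_2 + 1)).map (fun _ => (0 : Int))
     let st := (PySem.List.pyRange 1 (length_1 + 1)).foldl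
       (fun (st : List Int × List Int) i =>
         let current := st.2.set 0 i
         let current := (PySem.List.pyRange 1 (length_2 + 1)).foldl
           (fun cur j =>
             if PySem.Str.pyGet? s1 (i - 1) = PySem.Str.pyGet? s2 (j - 1) then
               let diagonal : Int := (PySem.List.pyGet? st.1 (j - 1)).getD 0
               cur.set j.toNat diagonal
             else
               let left_value : Int := (PySem.List.pyGet? cur (j - 1)).getD 0
               let up_value : Int := (PySem.List.pyGet? st.1 j).getD 0
               let minimum_previous_value : Int := min left_value up_value
               cur.set j.toNat (1 + minimum_previous_value)) current
         (current, current)) (previous, current)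
     (PySem.List.pyGet? st.2 (-1)).getD 0)
    = Dij s1.toList s2.toList s1.toList.length s2.toList.length := by
  show (PySem.List.pyGet? ((PySem.List.pyRange 1 ((PySem.Str.len s1) + 1)).foldl
      (fun (st : List Int × List Int) i =>
        ((PySem.List.pyRange 1 ((PySem.Str.len s2) + 1)).foldl (stepA s1 s2 st.1 i)
            (st.2.set 0 i),
         (PySem.List.pyRange 1 ((PySem.Str.len s2) + 1)).foldl (stepA s1 s2 st.1 i)
            (st.2.set 0 i)))
      (PySem.List.pyRange 0 ((PySem.Str.len s2) + 1),
       (PySem.List.pyRange 0 ((PySem.Str.len s2) + 1)).map (fun _ => (0 : Int)))).2 (-1)).getD 0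
    = Dij s1.toList s2.toList s1.toList.length s2.toList.length
  rw [lenA s1, lenA s2]
  have hcur0 : ((PySem.List.pyRange 0 ((s2.toList.length : Int) + 1)).map
      (fun _ => (0 : Int))).length = s2.toList.length + 1 := by
    rw [List.length_map, show ((s2.toList.length : Int) + 1)
        = ((s2.toList.length + 1 : Nat) : Int) by push_cast; ring,
      PySem.List.pyRange_zero_natCast, List.length_map, List.length_range]
  rcases Nat.eq_zero_or_pos s1.toList.length with hn0 | hn1
  · have hm0 : s2.toList.length = 0 := by omega
    rw [hn0, hm0, show (((0 : Nat) : Int) + 1) = 1 by norm_num,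
      PySem.List.pyRange_one_eq_nil le_rfl]
    simp only [List.foldl_nil]
    rw [show PySem.List.pyRange 0 (1 : Int) = [(0 : Int)] from by decide,
      show Dij s1.toList s2.toList 0 0 = ((0 : Nat) : Int) from by rw [Dij]]
    simp [PySem.List.pyGet?_neg_one]
  · generalize hg : (PySem.List.pyRange 0 ((s2.toList.length : Int) + 1)).map
      (fun _ => (0 : Int)) = cur0 at hcur0 ⊢
    rw [init_prev s2.toList.length s1.toList s2.toList rfl]
    obtain ⟨_, _, h3⟩ := outerA_spec s1.toList s2.toList s1 s2 rfl rfl s1.toList.length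
      le_rfl cur0 hcur0
    rw [h3 hn1, PySem.List.pyGet?_neg_one, rowD_getLast]
    rfl

theorem a_eq (str1 str2 : String) :
    deletion_distance str1 str2 =
      (let p := if PySem.Str.len str1 < PySem.Str.len str2 then (str2, str1) else (str1, str2)
       Dij p.1.toList p.2.toList p.1.toList.length p.2.toList.length) := by
  unfold deletion_distance
  by_cases h : PySem.Str.len str1 < PySem.Str.len str2
  · rw [if_pos h]
    refine aCore str2 str1 ?_
    rw [lenA, lenA] at h
    exact_mod_cast h.le
  · rw [if_neg h]
    refine aCore str1 str2 ?_
    rw [lenA, lenA] at h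
    omega

-- ===== VERDICT (by name: the statement is the Claim_ definition above) =====
theorem deletion_distance_spec : Claim_equal_deletion_distance := by
  intro str1 str2 _
  unfold Spec_deletion_distance
  rw [a_eq, alt_eq]
  simp only []
  rw [Dij_eq]
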